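-- pv_equiv track=rewrite | github.com/frosty865/PSA-Toolbox | tools/cisa-site-assessment/services/processor/model/module_packet_parser_client.py | _evidence_in_any_chunk
-- ===== SOURCE A (Python) =====
-- from typing import Any, Dict, List
--
-- def _evidence_in_any_chunk(evidence: str, chunks: List[Dict[str, Any]]) -> bool:
--     # verify each phrase appears verbatim in at least one chunk
--     phrases = [p.strip() for p in (evidence or "").split("|") if p.strip()]
--     if not phrases:
--         return False
--     texts = [c.get("chunk_text", "") or "" for c in chunks]
--     for ph in phrases:
--         if not any(ph in t for t in texts):
--             return False
--     return True
-- ===== SOURCE B (Python) =====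
-- from typing import Any, Dict, List
--
-- def _evidence_in_any_chunk(evidence: str, chunks: List[Dict[str, Any]]) -> bool:
--     # Inverted traversal: one pass over chunks, shrinking the list of
--     # still-unmatched phrases; True as soon as nothing is outstanding.
--     pending = [p.strip() for p in (evidence or "").split("|") if p.strip()]
--     if not pending:
--         return False
--     for c in chunks:
--         text = c.get("chunk_text", "") or ""
--         pending = [ph for ph in pending if ph not in text]
--         if not pending:
--             return True
--     return False
-- ===== Notes on version B (the rewrite author's own statement) =====
-- stated objective: alternative
-- what changed: Loop order inverted: instead of scanning all chunk texts once per phrase, B makes a single pass over the chunks maintaining the list of still-unmatched phrases, shrinking it per chunk and returning True as soon as it empties.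
import Mathlib
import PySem

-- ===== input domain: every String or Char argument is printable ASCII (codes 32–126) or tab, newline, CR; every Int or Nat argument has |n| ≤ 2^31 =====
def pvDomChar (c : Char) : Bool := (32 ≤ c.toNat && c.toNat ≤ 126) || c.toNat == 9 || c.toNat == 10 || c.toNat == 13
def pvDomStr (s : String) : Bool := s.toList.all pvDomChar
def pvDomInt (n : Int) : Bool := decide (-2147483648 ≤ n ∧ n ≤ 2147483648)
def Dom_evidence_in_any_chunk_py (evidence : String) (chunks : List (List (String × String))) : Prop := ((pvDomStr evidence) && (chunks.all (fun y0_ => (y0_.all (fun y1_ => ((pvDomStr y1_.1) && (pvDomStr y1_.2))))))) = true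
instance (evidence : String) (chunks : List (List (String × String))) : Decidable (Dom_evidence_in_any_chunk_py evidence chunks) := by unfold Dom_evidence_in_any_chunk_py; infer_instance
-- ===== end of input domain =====

-- B inverts the traversal: one pass over the chunks with a shrinking list of still-unmatched phrases (alternative decomposition, not claimed faster).
-- ===== PORT A =====
-- phrases = [p.strip() for p in (evidence or "").split("|") if p.strip()]
def pvPhrases (evidence : String) : List String :=
  (((PySem.Str.split? evidence "|").getD []).filter (fun p => PySem.Str.strip p ≠ "")).map PySem.Str.strip

-- c.get("chunk_text", "") or ""   (the `or ""` maps a falsy, i.e. empty, string to "")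
def pvChunkText (c : List (String × String)) : String :=
  let t := PySem.Dict.getD ⟨c⟩ "chunk_text" ""
  if t = "" then "" else t

def evidence_in_any_chunk_py (evidence : String) (chunks : List (List (String × String))) : Bool :=
  let phrases := pvPhrases evidence
  if phrases = [] then false
  else
    let texts := chunks.map pvChunkText
    -- for ph in phrases: if not any(ph in t for t in texts): return False / return True
    phrases.all (fun ph => texts.any (fun t => PySem.Str.isIn ph t))

-- ===== PORT B =====
def pvAltLoop (pending : List String) (chunks : List (List (String × String))) : Bool :=
  match chunks with
  | [] => false
  | c :: rest =>
    let text := pvChunkText c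
    let pending' := pending.filter (fun ph => !PySem.Str.isIn ph text)
    if pending' = [] then true else pvAltLoop pending' rest

def evidence_in_any_chunk_py_alt (evidence : String) (chunks : List (List (String × String))) : Bool :=
  let pending := pvPhrases evidence
  if pending = [] then false else pvAltLoop pending chunks

-- ===== PRECONDITION & SPEC =====
def Spec_evidence_in_any_chunk_py (evidence : String) (chunks : List (List (String × String))) (out : Bool) : Prop := out = evidence_in_any_chunk_py_alt evidence chunks
instance (evidence : String) (chunks : List (List (String × String))) (out : Bool) : Decidable (Spec_evidence_in_any_chunk_py evidence chunks out) := by unfold Spec_evidence_in_any_chunk_py; infer_instance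

-- ===== CLAIM (what is proved, stated in full; the proofs are below) =====
def Claim_equal_evidence_in_any_chunk_py : Prop := ∀ (evidence : String) (chunks : List (List (String × String))), Dom_evidence_in_any_chunk_py evidence chunks → Spec_evidence_in_any_chunk_py evidence chunks (evidence_in_any_chunk_py evidence chunks)

-- ===== LEMMAS AND PROOFS =====
-- B's shrinking-pending loop computes "every pending phrase occurs in some chunk",
-- provided pending is nonempty.
theorem pvAltLoop_eq (chunks : List (List (String × String))) (pending : List String)
    (h : pending ≠ []) :
    pvAltLoop pending chunks
      = pending.all (fun ph => chunks.any (fun c => PySem.Str.isIn ph (pvChunkText c))) := by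
  induction chunks generalizing pending with
  | nil =>
    cases pending with
    | nil => exact absurd rfl h
    | cons a t => simp [pvAltLoop]
  | cons c rest ih =>
    simp only [pvAltLoop]
    split_ifs with hp
    · have hall : ∀ ph ∈ pending, PySem.Str.isIn ph (pvChunkText c) = true := by
        intro ph hph
        cases hin : PySem.Str.isIn ph (pvChunkText c)
        · have hm := hp ▸ (List.mem_filter.2 ⟨hph, by simpa using hin⟩ : ph ∈ List.filter (fun ph => !PySem.Str.isIn ph (pvChunkText c)) pending)
          simp at hm
        · rfl
      symm
      rw [List.all_eq_true]
      intro ph hph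
      simp only [List.any_cons]
      rw [hall ph hph]
      simp
    · rw [ih _ hp, List.all_filter]
      congr 1
      funext ph
      simp only [List.any_cons]
      cases hin : PySem.Str.isIn ph (pvChunkText c) <;> simp_all

theorem evidence_in_any_chunk_py_spec : Claim_equal_evidence_in_any_chunk_py := by
  intro evidence chunks _
  unfold Spec_evidence_in_any_chunk_py evidence_in_any_chunk_py evidence_in_any_chunk_py_alt
  by_cases h : pvPhrases evidence = []
  · simp [h]
  · simp only [h, if_false]
    rw [pvAltLoop_eq chunks _ h]
    simp only [List.any_map, Function.comp_def]
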